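-- pv_equiv track=rewrite | github.com/lrslab/Hammerhead-motif | hammermotif/motif_merger.py | _get_consensus_base
-- ===== SOURCE A (Python) =====
-- from collections import Counter, defaultdict
-- from typing import List, Dict, Tuple, Optional, Set
--
-- def _get_consensus_base(bases: List[str]) -> str:
--     """Get IUPAC consensus base from list of bases."""
--     if not bases:
--         return 'N'
--
--     base_counts = Counter(bases)
--     total = len(bases)
--
--     # If one base is dominant (>80%), use it
--     for base, count in base_counts.items():
--         if count / total > 0.8:
--             return base
--
--     # Use degenerate codes
--     unique_bases = set(bases)
--
--     if len(unique_bases) == 2: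
--         bases_sorted = tuple(sorted(unique_bases))
--         degenerate_map = {
--             ('A', 'G'): 'R', ('C', 'T'): 'Y',
--             ('A', 'T'): 'W', ('C', 'G'): 'S',
--             ('G', 'T'): 'K', ('A', 'C'): 'M'
--         }
--         return degenerate_map.get(bases_sorted, 'N')
--
--     elif len(unique_bases) == 3:
--         missing = {'A', 'C', 'G', 'T'} - unique_bases
--         if missing == {'A'}:
--             return 'B'
--         elif missing == {'C'}:
--             return 'D'
--         elif missing == {'G'}:
--             return 'H'
--         elif missing == {'T'}:
--             return 'V'
--
--     return 'N'
-- ===== SOURCE B (Python) =====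
-- from collections import Counter
--
-- _BIT = {'A': 1, 'C': 2, 'G': 4, 'T': 8}
-- _IUPAC = {3: 'M', 5: 'R', 6: 'S', 9: 'W', 10: 'Y', 12: 'K',
--           7: 'V', 11: 'H', 13: 'D', 14: 'B'}
--
-- def _get_consensus_base(bases):
--     """IUPAC consensus base: dominant (>80%) base, else bitmask lookup."""
--     if not bases:
--         return 'N'
--     total = len(bases)
--     for base, count in Counter(bases).items():
--         if count / total > 0.8:
--             return base
--     mask = 0
--     for b in set(bases):
--         bit = _BIT.get(b)
--         if bit is None:
--             return 'N'
--         mask |= bit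
--     return _IUPAC.get(mask, 'N')
-- ===== Notes on version B (the rewrite author's own statement) =====
-- stated objective: simpler
-- what changed: The len==2/len==3 branch cascade with a sorted-pair dict and set-subtraction missing-base tests is replaced by a single IUPAC bitmask: OR the A/C/G/T bits of the unique bases (bailing to 'N' on any non-ACGT base) and look the mask up in one small table.
import Mathlib
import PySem

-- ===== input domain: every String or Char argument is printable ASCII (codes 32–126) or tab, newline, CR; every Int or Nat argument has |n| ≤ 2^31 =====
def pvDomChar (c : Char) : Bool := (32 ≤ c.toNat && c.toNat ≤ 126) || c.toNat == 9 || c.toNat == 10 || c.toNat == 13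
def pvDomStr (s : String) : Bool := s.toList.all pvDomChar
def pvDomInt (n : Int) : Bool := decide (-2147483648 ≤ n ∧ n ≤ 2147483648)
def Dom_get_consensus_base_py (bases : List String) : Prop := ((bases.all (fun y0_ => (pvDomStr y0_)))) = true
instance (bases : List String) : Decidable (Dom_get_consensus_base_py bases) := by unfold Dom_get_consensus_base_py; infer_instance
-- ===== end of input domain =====

-- B replaces A's len==2/len==3 branch cascade over the unique-base set by an IUPAC bitmask
-- (OR the A/C/G/T bits of the unique bases, bail to 'N' on an unknown base, one table lookup);
-- objective: simpler, same cost.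
-- In both ports the Python float test 'count / total > 0.8' is ported as the integer test
-- '5 * count > 4 * total', which is exact for every list length reachable here.

-- ===== PORT A =====
-- the '>80% dominant' for-loop of A: first counter item whose count exceeds 0.8*total
def pyDominantLoopA (items : List (String × Int)) (total : Int) : Option String :=
  match items with
  | [] => none
  | (base, count) :: rest =>
      if 5 * count > 4 * total then some base else pyDominantLoopA rest total

def degenerateMap : List ((String × String) × String) :=
  [(("A","G"),"R"), (("C","T"),"Y"), (("A","T"),"W"),
   (("C","G"),"S"), (("G","T"),"K"), (("A","C"),"M")]

def get_consensus_base_py (bases : List String) : String :=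
  if bases = [] then "N"
  else
    let base_counts := PySem.Dict.counter bases
    let total : Int := bases.length
    match pyDominantLoopA base_counts.items total with
    | some base => base
    | none =>
      let unique_bases := PySem.Set.ofList bases
      if PySem.Set.len unique_bases = 2 then
        -- tuple(sorted(unique_bases)); the match is total: the branch guard gives length 2
        match PySem.List.sorted unique_bases (fun x => x) false with
        | [x, y] => (PySem.Dict.ofList degenerateMap).getD (x, y) "N"
        | _ => "N"
      else if PySem.Set.len unique_bases = 3 then
        let missing := PySem.Set.diff (PySem.Set.ofList ["A","C","G","T"]) unique_bases
        if PySem.Set.equal missing (PySem.Set.ofList ["A"]) then "B"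
        else if PySem.Set.equal missing (PySem.Set.ofList ["C"]) then "D"
        else if PySem.Set.equal missing (PySem.Set.ofList ["G"]) then "H"
        else if PySem.Set.equal missing (PySem.Set.ofList ["T"]) then "V"
        else "N"
      else "N"

-- ===== PORT B =====
def pyDominantLoopB (items : List (String × Int)) (total : Int) : Option String :=
  match items with
  | [] => none
  | (base, count) :: rest =>
      if 5 * count > 4 * total then some base else pyDominantLoopB rest total

-- _BIT.get(b)
def bitOfBase (b : String) : Option Int :=
  if b = "A" then some 1
  else if b = "C" then some 2
  else if b = "G" then some 4
  else if b = "T" then some 8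
  else none

def iupacTable : List (Int × String) :=
  [(3,"M"), (5,"R"), (6,"S"), (9,"W"), (10,"Y"), (12,"K"),
   (7,"V"), (11,"H"), (13,"D"), (14,"B")]

-- the 'for b in set(bases)' loop of B: OR the bits together, none = early return 'N'
def maskLoop (elems : List String) (mask : Int) : Option Int :=
  match elems with
  | [] => some mask
  | b :: rest =>
      match bitOfBase b with
      | none => none
      | some bit => maskLoop rest (Int.lor mask bit)

def get_consensus_base_py_alt (bases : List String) : String :=
  if bases = [] then "N"
  else
    let total : Int := bases.length
    match pyDominantLoopB (PySem.Dict.counter bases).items total with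
    | some base => base
    | none =>
      match maskLoop (PySem.Set.ofList bases) 0 with
      | none => "N"
      | some mask => (PySem.Dict.ofList iupacTable).getD mask "N"

-- ===== PRECONDITION & SPEC =====
def Spec_get_consensus_base_py (bases : List String) (out : String) : Prop := out = get_consensus_base_py_alt bases
instance (bases : List String) (out : String) : Decidable (Spec_get_consensus_base_py bases out) := by unfold Spec_get_consensus_base_py; infer_instance

-- ===== CLAIM (what is proved, stated in full; the proofs are below) =====
def Claim_equal_get_consensus_base_py : Prop := ∀ (bases : List String), Dom_get_consensus_base_py bases → Spec_get_consensus_base_py bases (get_consensus_base_py bases)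

-- ===== LEMMAS AND PROOFS =====

theorem dominant_loops_eq (items : List (String × Int)) (total : Int) :
    pyDominantLoopA items total = pyDominantLoopB items total := by
  induction items with
  | nil => rfl
  | cons p rest ih =>
      obtain ⟨b, c⟩ := p
      simp [pyDominantLoopA, pyDominantLoopB, ih]

-- A's tail (after the dominant loop) as a function of the unique-base list
def branchA (u : List String) : String :=
  if PySem.Set.len u = 2 then
    match PySem.List.sorted u (fun x => x) false with
    | [x, y] => (PySem.Dict.ofList degenerateMap).getD (x, y) "N"
    | _ => "N"
  else if PySem.Set.len u = 3 then
    let missing := PySem.Set.diff (PySem.Set.ofList ["A","C","G","T"]) u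
    if PySem.Set.equal missing (PySem.Set.ofList ["A"]) then "B"
    else if PySem.Set.equal missing (PySem.Set.ofList ["C"]) then "D"
    else if PySem.Set.equal missing (PySem.Set.ofList ["G"]) then "H"
    else if PySem.Set.equal missing (PySem.Set.ofList ["T"]) then "V"
    else "N"
  else "N"

def branchB (u : List String) : String :=
  match maskLoop u 0 with
  | none => "N"
  | some mask => (PySem.Dict.ofList iupacTable).getD mask "N"

theorem bitOfBase_ne_none_mem (x : String) (h : bitOfBase x ≠ none) :
    x ∈ (["A","C","G","T"] : List String) := by
  unfold bitOfBase at h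
  split_ifs at h with h1 h2 h3 h4
  · simp [h1]
  · simp [h2]
  · simp [h3]
  · simp [h4]
  · exact absurd rfl h

theorem bitOfBase_none_ne (x : String) (h : bitOfBase x = none) :
    x ≠ "A" ∧ x ≠ "C" ∧ x ≠ "G" ∧ x ≠ "T" := by
  unfold bitOfBase at h
  split_ifs at h with h1 h2 h3 h4
  exact ⟨h1, h2, h3, h4⟩

theorem bitOfBase_some_nat (b : String) (bit : Int) (h : bitOfBase b = some bit) :
    ∃ k : Nat, bit = (k : Int) := by
  unfold bitOfBase at h
  split_ifs at h <;> cases h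
  · exact ⟨1, rfl⟩
  · exact ⟨2, rfl⟩
  · exact ⟨4, rfl⟩
  · exact ⟨8, rfl⟩

theorem lor_natCast (m n : Nat) : Int.lor (m : Int) (n : Int) = ((m ||| n : Nat) : Int) := rfl

theorem maskLoop_none (u : List String) (m : Int) (z : String) (hz : z ∈ u)
    (hbad : bitOfBase z = none) : maskLoop u m = none := by
  induction u generalizing m with
  | nil => cases hz
  | cons b rest ih =>
      rcases List.mem_cons.mp hz with hz | hz
      · subst hz; simp [maskLoop, hbad]
      · unfold maskLoop
        cases hb : bitOfBase b
        · rfl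
        · exact ih _ hz

theorem maskLoop_perm (u v : List String) (h : u.Perm v) (n : Nat) :
    maskLoop u (n : Int) = maskLoop v (n : Int) := by
  induction h generalizing n with
  | nil => rfl
  | cons x _ ih =>
      cases hx : bitOfBase x with
      | none => simp [maskLoop, hx]
      | some bit =>
          obtain ⟨k, rfl⟩ := bitOfBase_some_nat _ _ hx
          simp only [maskLoop, hx, lor_natCast]
          exact ih _
  | swap x y l =>
      cases hx : bitOfBase x with
      | none =>
          cases hy : bitOfBase y with
          | none => simp [maskLoop, hx, hy]
          | some bity => simp [maskLoop, hx, hy]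
      | some bitx =>
          cases hy : bitOfBase y with
          | none => simp [maskLoop, hx, hy]
          | some bity =>
              simp only [maskLoop, hx, hy]
              obtain ⟨kx, rfl⟩ := bitOfBase_some_nat _ _ hx
              obtain ⟨ky, rfl⟩ := bitOfBase_some_nat _ _ hy
              rw [lor_natCast, lor_natCast, lor_natCast, lor_natCast,
                Nat.lor_assoc, Nat.lor_assoc, Nat.lor_comm ky kx]
  | trans _ _ ih1 ih2 => rw [ih1, ih2]

theorem lookup_none (x y : String) (h : bitOfBase x = none ∨ bitOfBase y = none) :
    (PySem.Dict.ofList degenerateMap).getD (x, y) "N" = "N" := by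
  have hmk : PySem.Dict.ofList degenerateMap = PySem.Dict.mk degenerateMap := by decide
  rw [hmk]
  rcases h with h | h <;>
    obtain ⟨h1, h2, h3, h4⟩ := bitOfBase_none_ne _ h <;>
    simp [degenerateMap, PySem.Dict.getD, Prod.ext_iff,
      Ne.symm h1, Ne.symm h2, Ne.symm h3, Ne.symm h4, PySem.Dict.get?]

theorem four_in_three {u : List String} (hlen : u.length = 3)
    {z a b c : String} (hz : z ∈ u) (ha : a ∈ u) (hb : b ∈ u) (hc : c ∈ u)
    (hza : z ≠ a) (hzb : z ≠ b) (hzc : z ≠ c)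
    (hab : a ≠ b) (hac : a ≠ c) (hbc : b ≠ c) : False := by
  have hnd4 : ([z, a, b, c] : List String).Nodup := by
    simp [List.nodup_cons, hza, hzb, hzc, hab, hac, hbc]
  have hsub : ([z, a, b, c] : List String) ⊆ u := by
    intro w hw
    simp only [List.mem_cons, List.not_mem_nil, or_false] at hw
    rcases hw with rfl | rfl | rfl | rfl <;> assumption
  have hle := (hnd4.subperm hsub).length_le
  simp [hlen] at hle

theorem contains_perm (u v : List String) (h : u.Perm v) (x : String) :
    u.contains x = v.contains x := by
  by_cases hx : x ∈ u
  · simp [List.contains_eq_mem, hx, h.mem_iff.mp hx]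
  · have hv : x ∉ v := fun hv => hx (h.mem_iff.mpr hv)
    simp [List.contains_eq_mem, hx, hv]

theorem branchA_perm (u v : List String) (h : u.Perm v) : branchA u = branchA v := by
  unfold branchA
  have hlen : PySem.Set.len u = PySem.Set.len v := by
    simp [PySem.Set.len, h.length_eq]
  have hsort : PySem.List.sorted u (fun x => x) false = PySem.List.sorted v (fun x => x) false :=
    PySem.List.sorted_eq_sorted_of_perm u v _ (fun _ _ hab => hab) h
  have hdiff : PySem.Set.diff (PySem.Set.ofList ["A","C","G","T"]) u
      = PySem.Set.diff (PySem.Set.ofList ["A","C","G","T"]) v := by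
    unfold PySem.Set.diff
    exact List.filter_congr (fun x _ => by
      unfold PySem.Set.contains
      rw [contains_perm u v h x])
  rw [hlen, hsort, hdiff]

theorem branchB_perm (u v : List String) (h : u.Perm v) : branchB u = branchB v := by
  unfold branchB
  have := maskLoop_perm u v h 0
  simp only [Nat.cast_zero] at this
  rw [this]

theorem branch_eq (u : List String) (hnd : u.Nodup) : branchA u = branchB u := by
  by_cases hbad : ∃ z ∈ u, bitOfBase z = none
  · obtain ⟨z, hzu, hz⟩ := hbad
    have hB : branchB u = "N" := by
      unfold branchB; rw [maskLoop_none u 0 z hzu hz]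
    rw [hB]; unfold branchA
    by_cases h2 : PySem.Set.len u = 2
    · rw [if_pos h2]
      cases hs : PySem.List.sorted u (fun x => x) false with
      | nil => rfl
      | cons x t =>
        cases t with
        | nil => rfl
        | cons y t2 =>
          cases t2 with
          | cons _ _ => rfl
          | nil =>
            apply lookup_none
            have hzin : z ∈ PySem.List.sorted u (fun x => x) false :=
              (PySem.List.mem_sorted u (fun x => x) false z).mpr hzu
            rw [hs] at hzin
            simp only [List.mem_cons, List.not_mem_nil, or_false] at hzin
            rcases hzin with rfl | rfl
            · exact Or.inl hz
            · exact Or.inr hz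
    · rw [if_neg h2]
      by_cases h3 : PySem.Set.len u = 3
      · rw [if_pos h3]
        have hlen3 : u.length = 3 := by
          simp [PySem.Set.len] at h3; omega
        obtain ⟨hz1, hz2, hz3, hz4⟩ := bitOfBase_none_ne z hz
        have notEq : ∀ w : String, w ∈ (["A","C","G","T"] : List String) → z ≠ w →
            ∀ (a b c : String), a ≠ w → b ≠ w → c ≠ w →
            a ∈ (["A","C","G","T"] : List String) → b ∈ (["A","C","G","T"] : List String) →
            c ∈ (["A","C","G","T"] : List String) → a ≠ b → a ≠ c → b ≠ c →
            z ≠ a → z ≠ b → z ≠ c →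
            PySem.Set.equal (PySem.Set.diff (PySem.Set.ofList ["A","C","G","T"]) u)
              (PySem.Set.ofList [w]) ≠ true := by
          intro w hw hzw a b c haw hbw hcw hA hBm hCm hab hac hbc hza hzb hzc heq
          rw [PySem.Set.equal_iff] at heq
          have hmem : ∀ x : String, x ∈ (["A","C","G","T"] : List String) → x ≠ w → x ∈ u := by
            intro x hxl hxw
            by_contra hxu
            have hxd : x ∈ PySem.Set.diff (PySem.Set.ofList ["A","C","G","T"]) u := by
              rw [PySem.Set.mem_diff]
              exact ⟨by rw [PySem.Set.mem_ofList]; exact hxl, hxu⟩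
            have := (heq x).mp hxd
            rw [PySem.Set.mem_ofList] at this
            simp only [List.mem_cons, List.not_mem_nil, or_false] at this
            exact hxw this
          exact four_in_three hlen3 hzu (hmem a hA haw) (hmem b hBm hbw) (hmem c hCm hcw)
            hza hzb hzc hab hac hbc
        rw [if_neg (notEq "A" (by simp) hz1 "C" "G" "T" (by decide) (by decide) (by decide)
              (by simp) (by simp) (by simp) (by decide) (by decide) (by decide) hz2 hz3 hz4),
            if_neg (notEq "C" (by simp) hz2 "A" "G" "T" (by decide) (by decide) (by decide)
              (by simp) (by simp) (by simp) (by decide) (by decide) (by decide) hz1 hz3 hz4),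
            if_neg (notEq "G" (by simp) hz3 "A" "C" "T" (by decide) (by decide) (by decide)
              (by simp) (by simp) (by simp) (by decide) (by decide) (by decide) hz1 hz2 hz4),
            if_neg (notEq "T" (by simp) hz4 "A" "C" "G" (by decide) (by decide) (by decide)
              (by simp) (by simp) (by simp) (by decide) (by decide) (by decide) hz1 hz2 hz3)]
      · rw [if_neg h3]
  · push Not at hbad
    have hsub : u ⊆ (["A","C","G","T"] : List String) := by
      intro x hx
      exact bitOfBase_ne_none_mem x (hbad x hx)
    obtain ⟨s, hperm, hsl⟩ := hnd.subperm hsub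
    have hmem : s ∈ (["A","C","G","T"] : List String).sublists :=
      List.mem_sublists.mpr hsl
    rw [branchA_perm u s hperm.symm, branchB_perm u s hperm.symm]
    fin_cases hmem <;>
      · simp [branchA, branchB, maskLoop, bitOfBase, iupacTable, degenerateMap,
          PySem.Set.len, PySem.List.sorted_eq_foldl_insertBy, PySem.List.insertBy]
        try decide

-- ===== VERDICT (by name: the statement is the Claim_ definition above) =====
theorem get_consensus_base_py_spec : Claim_equal_get_consensus_base_py := by
  intro bases _
  unfold Spec_get_consensus_base_py get_consensus_base_py get_consensus_base_py_alt
  by_cases h : bases = []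
  · simp [h]
  · simp only [h]
    rw [dominant_loops_eq]
    cases hd : pyDominantLoopB (PySem.Dict.counter bases).items (bases.length : Int) with
    | some b => rfl
    | none =>
        exact branch_eq (PySem.Set.ofList bases) (PySem.Set.nodup_ofList bases)
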